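-- pv_equiv track=rewrite | github.com/marinakirnos/learn-python-hillel-05-05-2023 | lesson_12/hw_12/hw_10.py | category_brand_items_count
-- ===== SOURCE A (Python) =====
-- def category_brand_items_count(all_data: dict):
--     """
--     Рахує розподіл товарів по брендам для кожної категорії та виводить це на екран
--     :param all_data: записи по товару
--     :return: Кол-во товаров по брендам в каждой категории
--     """
--     count_brand_for_category = {}
--     for product in all_data.values():
--         category = product['category']
--         brand = product['brand']
--         if category not in count_brand_for_category:
--             count_brand_for_category[category] = {}
--         if brand not in count_brand_for_category[category]:
--             count_brand_for_category[category][brand] = 0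
--         count_brand_for_category[category][brand] += 1
--     return count_brand_for_category
-- ===== SOURCE B (Python) =====
-- def category_brand_items_count(all_data: dict):
--     """
--     Declarative re-implementation: extract the (category, brand) pair of every
--     product once, then build the nested result by comprehension — categories in
--     first-occurrence order, brands in first-occurrence order within a category,
--     each count obtained in closed form with list.count.
--     """
--     pairs = [(p['category'], p['brand']) for p in all_data.values()]
--     return {c: {b: pairs.count((c, b))
--                 for b in dict.fromkeys(b2 for c2, b2 in pairs if c2 == c)}
--             for c in dict.fromkeys(c2 for c2, _ in pairs)}
-- ===== Notes on version B (the rewrite author's own statement) =====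
-- stated objective: simpler
-- what changed: The imperative loop that mutates a nested dict entry by entry is replaced by one pass extracting (category, brand) pairs and a nested dict comprehension over first-occurrence-deduplicated categories and brands, each count obtained in closed form with list.count.
import Mathlib
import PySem

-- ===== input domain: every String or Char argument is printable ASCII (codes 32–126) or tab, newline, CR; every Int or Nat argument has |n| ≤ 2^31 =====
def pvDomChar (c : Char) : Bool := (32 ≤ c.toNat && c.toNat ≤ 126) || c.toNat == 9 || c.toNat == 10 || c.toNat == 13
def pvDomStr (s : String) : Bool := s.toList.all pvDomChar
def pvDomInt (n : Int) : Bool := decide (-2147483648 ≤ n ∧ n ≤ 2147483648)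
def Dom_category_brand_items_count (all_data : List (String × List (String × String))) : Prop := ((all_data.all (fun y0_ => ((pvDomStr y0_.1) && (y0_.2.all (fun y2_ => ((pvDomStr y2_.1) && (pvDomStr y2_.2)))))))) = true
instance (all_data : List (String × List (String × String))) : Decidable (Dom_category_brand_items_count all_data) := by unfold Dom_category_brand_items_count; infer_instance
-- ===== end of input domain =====

-- B replaces A's imperative nested-dict mutation loop by one pair-extraction pass plus nested
-- comprehensions with closed-form counts (objective: simpler, not faster).

-- ===== PORT A =====
-- A iterates all_data.values(), building the nested dict incrementally.
-- product['category'] / product['brand'] are exact under Pre_ (the keys are present), ported as getD.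
def category_brand_items_count (all_data : List (String × List (String × String))) : List (String × List (String × Int)) :=
  let count_brand_for_category :=
    ((PySem.Dict.ofList all_data).values).foldl (fun acc product =>
      let pd := PySem.Dict.ofList product
      let category := pd.getD "category" ""
      let brand := pd.getD "brand" ""
      let acc := if acc.contains category then acc else acc.insert category PySem.Dict.empty
      let inner := acc.getD category PySem.Dict.empty
      let inner := if inner.contains brand then inner else inner.insert brand (0 : Int)
      acc.insert category (inner.insert brand (inner.getD brand 0 + 1)))
      (PySem.Dict.empty : PySem.Dict String (PySem.Dict String Int))
  count_brand_for_category.items.map (fun p => (p.1, p.2.items))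

-- ===== PORT B =====
-- B extracts the (category, brand) pair list once, then builds the nested result by comprehension;
-- dict.fromkeys(...) keeps first occurrences in order = PySem.Set.ofList.
def category_brand_items_count_alt (all_data : List (String × List (String × String))) : List (String × List (String × Int)) :=
  let pairs := ((PySem.Dict.ofList all_data).values).map (fun p =>
      ((PySem.Dict.ofList p).getD "category" "", (PySem.Dict.ofList p).getD "brand" ""))
  (PySem.Set.ofList (pairs.map (fun q => q.1))).map (fun c =>
    (c, (PySem.Set.ofList ((pairs.filter (fun q => q.1 == c)).map (fun q => q.2))).map (fun b =>
      (b, (pairs.count (c, b) : Int)))))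

-- ===== PRECONDITION & SPEC =====
-- Pre_ excludes exactly the inputs where Python A raises KeyError: some product (a value of the
-- dict built from all_data) is missing the 'category' or 'brand' key.
def Pre_category_brand_items_count (all_data : List (String × List (String × String))) : Prop :=
  ∀ product ∈ (PySem.Dict.ofList all_data).values,
    (PySem.Dict.ofList product).contains "category" = true ∧
    (PySem.Dict.ofList product).contains "brand" = true
instance (all_data : List (String × List (String × String))) : Decidable (Pre_category_brand_items_count all_data) := by unfold Pre_category_brand_items_count; infer_instance

def pvWitness_category_brand_items_count : (List (String × List (String × String))) :=
  [("1", [("category", "food"), ("brand", "acme")]),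
   ("2", [("category", "food"), ("brand", "bolt")]),
   ("3", [("category", "food"), ("brand", "acme")])]

def Spec_category_brand_items_count (all_data : List (String × List (String × String))) (out : List (String × List (String × Int))) : Prop := out = category_brand_items_count_alt all_data
instance (all_data : List (String × List (String × String))) (out : List (String × List (String × Int))) : Decidable (Spec_category_brand_items_count all_data out) := by unfold Spec_category_brand_items_count; infer_instance

-- ===== CLAIM (what is proved, stated in full; the proofs are below) =====
def Claim_equal_category_brand_items_count : Prop := ∀ (all_data : List (String × List (String × String))), Dom_category_brand_items_count all_data → Pre_category_brand_items_count all_data → Spec_category_brand_items_count all_data (category_brand_items_count all_data)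

-- ===== LEMMAS AND PROOFS =====

def stepA (acc : PySem.Dict String (PySem.Dict String Int)) (k : String × String) :
    PySem.Dict String (PySem.Dict String Int) :=
  let acc := if acc.contains k.1 then acc else acc.insert k.1 PySem.Dict.empty
  let inner := acc.getD k.1 PySem.Dict.empty
  let inner := if inner.contains k.2 then inner else inner.insert k.2 (0 : Int)
  acc.insert k.1 (inner.insert k.2 (inner.getD k.2 0 + 1))
def brandsD (ps : List (String × String)) (c : String) : PySem.Dict String Int :=
  ⟨(PySem.Set.ofList ((ps.filter (fun q => q.1 == c)).map (fun q => q.2))).map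
      (fun b => (b, (ps.count (c, b) : Int)))⟩
def canonD (ps : List (String × String)) : PySem.Dict String (PySem.Dict String Int) :=
  ⟨(PySem.Set.ofList (ps.map (fun q => q.1))).map (fun c => (c, brandsD ps c))⟩
theorem contains_canonD (ps : List (String × String)) (c : String) :
    (canonD ps).contains c = true ↔ c ∈ ps.map (fun q => q.1) := by
  simp [canonD, PySem.Dict.contains, List.any_map, List.any_eq_true, PySem.Set.mem_ofList,
    Function.comp_def]
theorem keys_canonD (ps : List (String × String)) :
    (canonD ps).keys = PySem.Set.ofList (ps.map (fun q => q.1)) := by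
  simp [canonD, PySem.Dict.keys, List.map_map, Function.comp_def]
theorem getD_canonD (ps : List (String × String)) (c : String)
    (h : c ∈ ps.map (fun q => q.1)) :
    (canonD ps).getD c PySem.Dict.empty = brandsD ps c := by
  apply PySem.Dict.getD_of_mem_items
  · simp only [canonD, List.mem_map]
    exact ⟨c, by simpa [PySem.Set.mem_ofList] using h, rfl⟩
  · rw [keys_canonD]; exact PySem.Set.nodup_ofList _
theorem contains_brandsD (ps : List (String × String)) (c b : String) :
    (brandsD ps c).contains b = true ↔ (c, b) ∈ ps := by
  simp [brandsD, PySem.Dict.contains, List.any_map, List.any_eq_true, PySem.Set.mem_ofList,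
    Function.comp_def, List.mem_filter, List.mem_map]
theorem keys_brandsD (ps : List (String × String)) (c : String) :
    (brandsD ps c).keys = PySem.Set.ofList ((ps.filter (fun q => q.1 == c)).map (fun q => q.2)) := by
  simp [brandsD, PySem.Dict.keys, List.map_map, Function.comp_def]
theorem getD_brandsD (ps : List (String × String)) (c b : String) (h : (c, b) ∈ ps) :
    (brandsD ps c).getD b 0 = (ps.count (c, b) : Int) := by
  apply PySem.Dict.getD_of_mem_items
  · simp only [brandsD, List.mem_map]
    refine ⟨b, ?_, rfl⟩
    simp only [PySem.Set.mem_ofList, List.mem_map, List.mem_filter]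
    exact ⟨(c, b), ⟨h, by simp⟩, rfl⟩
  · rw [keys_brandsD]; exact PySem.Set.nodup_ofList _
theorem brandsD_append_ne (ps : List (String × String)) (p : String × String) (c : String)
    (h : c ≠ p.1) : brandsD (ps ++ [p]) c = brandsD ps c := by
  have h1 : (p.1 == c) = false := by simp [Ne.symm h]
  have h2 : ∀ b : String, List.count (c, b) [p] = 0 := by
    intro b
    simp only [List.count_singleton, beq_iff_eq]
    split
    · rename_i e; exact absurd (congrArg Prod.fst e) (fun e' => h e'.symm)
    · rfl
  simp [brandsD, List.filter_append, List.count_append, h1, h2]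
theorem count_append_pair (ps : List (String × String)) (c b b'' : String) :
    (ps ++ [(c, b)]).count (c, b'') = ps.count (c, b'') + (if b'' = b then 1 else 0) := by
  simp only [List.count_append, List.count_singleton, beq_iff_eq, Prod.mk.injEq]
  by_cases e : b'' = b
  · simp [e]
  · simp [e]; intro e'; exact absurd e'.symm e
theorem contains_brandsD_mem (ps : List (String × String)) (c b : String) :
    (brandsD ps c).contains b = true ↔
      b ∈ PySem.Set.ofList ((ps.filter (fun q => q.1 == c)).map (fun q => q.2)) := by
  simp [brandsD, PySem.Dict.contains, List.any_map, Function.comp_def, List.any_eq_true]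
theorem brandsD_append_self (ps : List (String × String)) (c b : String) :
    brandsD (ps ++ [(c, b)]) c = (brandsD ps c).insert b ((ps.count (c, b) : Int) + 1) := by
  have hfil : (ps ++ [(c, b)]).filter (fun q => q.1 == c) = ps.filter (fun q => q.1 == c) ++ [(c, b)] := by
    simp [List.filter_append]
  by_cases hb : b ∈ PySem.Set.ofList ((ps.filter (fun q => q.1 == c)).map (fun q => q.2))
  · rw [PySem.Dict.insert, if_pos ((contains_brandsD_mem ps c b).2 hb)]
    simp only [brandsD, hfil, List.map_append, List.map_cons, List.map_nil,
      PySem.Set.ofList_append_singleton, PySem.Set.add_of_mem hb, List.map_map]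
    congr 1
    apply List.map_congr_left
    intro b'' _
    rw [count_append_pair]
    by_cases e : b'' = b
    · subst e; simp
    · simp [e]
  · rw [PySem.Dict.insert, if_neg (by simp [(contains_brandsD_mem ps c b), hb])]
    simp only [brandsD, hfil, List.map_append, List.map_cons, List.map_nil,
      PySem.Set.ofList_append_singleton, PySem.Set.add_of_not_mem hb, List.map_append]
    congr 1
    congr 1
    · apply List.map_congr_left
      intro b'' hb''
      have e : b'' ≠ b := fun e => hb (e ▸ hb'')
      rw [count_append_pair]; simp [e]
    · rw [count_append_pair]; simp

theorem stepA_canonD (ps : List (String × String)) (p : String × String) :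
    stepA (canonD ps) p = canonD (ps ++ [p]) := by
  obtain ⟨c, b⟩ := p
  simp only [stepA]
  by_cases hcat : c ∈ ps.map (fun q => q.1)
  · rw [if_pos ((contains_canonD ps c).2 hcat)]
    rw [getD_canonD ps c hcat]
    have key : (if (brandsD ps c).contains b then brandsD ps c else (brandsD ps c).insert b (0 : Int)).insert b
        ((if (brandsD ps c).contains b then brandsD ps c else (brandsD ps c).insert b (0 : Int)).getD b 0 + 1)
        = (brandsD ps c).insert b ((ps.count (c, b) : Int) + 1) := by
      by_cases hbr : (c, b) ∈ ps
      · rw [if_pos ((contains_brandsD ps c b).2 hbr), getD_brandsD ps c b hbr]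
      · have hc : ¬ (brandsD ps c).contains b = true := by
          rw [contains_brandsD]; exact hbr
        rw [if_neg hc, PySem.Dict.getD_insert_self, PySem.Dict.insert_insert_self,
          List.count_eq_zero.2 hbr]
        norm_num
    rw [key, ← brandsD_append_self]
    -- outer insert in place
    rw [PySem.Dict.insert, if_pos ((contains_canonD ps c).2 hcat)]
    have hcats : PySem.Set.ofList ((ps ++ [(c, b)]).map (fun q => q.1))
        = PySem.Set.ofList (ps.map (fun q => q.1)) := by
      rw [List.map_append, List.map_cons, List.map_nil, PySem.Set.ofList_append_singleton,
        PySem.Set.add_of_mem (by rwa [PySem.Set.mem_ofList])]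
    show (⟨_⟩ : PySem.Dict String (PySem.Dict String Int)) = _
    unfold canonD
    rw [hcats]
    congr 1
    rw [List.map_map]
    apply List.map_congr_left
    intro c' hc'
    by_cases e : c' = c
    · subst e; simp
    · have : (c' == c) = false := by simp [e]
      simp only [Function.comp_def, this, Bool.false_eq_true, if_false]
      rw [brandsD_append_ne ps (c, b) c' e]
  · have hnc : ¬ (canonD ps).contains c = true := by rw [contains_canonD]; exact hcat
    rw [if_neg hnc]
    -- acc1 = (canonD ps).insert c ∅
    have hitems : ((canonD ps).insert c PySem.Dict.empty).items
        = (canonD ps).items ++ [(c, PySem.Dict.empty)] := by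
      rw [PySem.Dict.items_insert, if_neg (by simpa using hnc)]
    have hgetD : ((canonD ps).insert c PySem.Dict.empty).getD c PySem.Dict.empty = PySem.Dict.empty := by
      apply PySem.Dict.getD_of_mem_items
      · rw [hitems]; exact List.mem_append_right _ (by simp)
      · show (((canonD ps).insert c PySem.Dict.empty).items.map Prod.fst).Nodup
        rw [hitems]
        simp only [List.map_append, List.map_cons, List.map_nil]
        rw [List.nodup_append]
        refine ⟨?_, List.nodup_singleton c, ?_⟩
        · have hnd := PySem.Set.nodup_ofList (ps.map (fun q => q.1))
          rw [← keys_canonD] at hnd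
          simpa [PySem.Dict.keys] using hnd
        · intro x hx y hy
          have hxm : x ∈ (canonD ps).keys := by simpa [PySem.Dict.keys] using hx
          rw [keys_canonD, PySem.Set.mem_ofList] at hxm
          rw [List.mem_singleton] at hy
          subst hy
          intro e
          rw [e] at hxm
          exact hcat hxm
    rw [hgetD]
    rw [if_neg (by simp [PySem.Dict.contains, PySem.Dict.empty])]
    rw [PySem.Dict.getD_insert_self, PySem.Dict.insert_insert_self]
    -- final: ((canonD ps).insert c ∅).insert c (∅.insert b (0+1)) = canonD (ps++[(c,b)])
    rw [PySem.Dict.insert_insert_self]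
    have hfresh : ((canonD ps).insert c (PySem.Dict.empty.insert b ((0 : Int) + 1))).items
        = (canonD ps).items ++ [(c, PySem.Dict.empty.insert b ((0 : Int) + 1))] := by
      rw [PySem.Dict.items_insert, if_neg (by simpa using hnc)]
    apply PySem.Dict.ext
    rw [hfresh]
    have hcats : PySem.Set.ofList ((ps ++ [(c, b)]).map (fun q => q.1))
        = PySem.Set.ofList (ps.map (fun q => q.1)) ++ [c] := by
      rw [List.map_append, List.map_cons, List.map_nil, PySem.Set.ofList_append_singleton,
        PySem.Set.add_of_not_mem (by rwa [PySem.Set.mem_ofList])]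
    show _ = (canonD (ps ++ [(c, b)])).items
    unfold canonD
    rw [hcats, List.map_append, List.map_cons, List.map_nil]
    congr 1
    · show (canonD ps).items = _
      unfold canonD
      apply List.map_congr_left
      intro c' hc'
      have e : c' ≠ c := by
        rw [PySem.Set.mem_ofList] at hc'
        exact fun e => hcat (e ▸ hc')
      rw [brandsD_append_ne ps (c, b) c' e]
    · -- new category entry
      have hfil0 : ps.filter (fun q => q.1 == c) = [] := by
        rw [List.filter_eq_nil_iff]
        intro q hq
        simp only [beq_iff_eq]
        exact fun e => hcat (e ▸ List.mem_map_of_mem hq)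
      have hcnt0 : ps.count (c, b) = 0 := by
        rw [List.count_eq_zero]
        exact fun h => hcat (List.mem_map_of_mem h)
      simp [brandsD, List.filter_append, hfil0, List.count_append, hcnt0,
        PySem.Dict.insert, PySem.Dict.empty, PySem.Dict.contains, PySem.Set.ofList]

theorem foldl_stepA_eq_canonD (ps : List (String × String)) :
    ps.foldl stepA PySem.Dict.empty = canonD ps := by
  induction ps using List.reverseRecOn with
  | nil => rfl
  | append_singleton ps p ih => rw [List.foldl_append, List.foldl_cons, List.foldl_nil, ih, stepA_canonD]

-- ===== VERDICT (by name: the statement is the Claim_ definition above) =====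
theorem category_brand_items_count_spec : Claim_equal_category_brand_items_count := by
  intro all_data _ _
  unfold Spec_category_brand_items_count category_brand_items_count category_brand_items_count_alt
  rw [show (fun (acc : PySem.Dict String (PySem.Dict String Int)) (product : List (String × String)) =>
      let pd := PySem.Dict.ofList product
      let category := pd.getD "category" ""
      let brand := pd.getD "brand" ""
      let acc := if acc.contains category then acc else acc.insert category PySem.Dict.empty
      let inner := acc.getD category PySem.Dict.empty
      let inner := if inner.contains brand then inner else inner.insert brand (0 : Int)
      acc.insert category (inner.insert brand (inner.getD brand 0 + 1)))
    = (fun acc product => stepA acc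
        ((PySem.Dict.ofList product).getD "category" "", (PySem.Dict.ofList product).getD "brand" ""))
    from rfl]
  rw [← List.foldl_map (f := fun product =>
        ((PySem.Dict.ofList product).getD "category" "", (PySem.Dict.ofList product).getD "brand" ""))]
  rw [foldl_stepA_eq_canonD]
  simp [canonD, brandsD, List.map_map, Function.comp_def]
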